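-- pv_equiv track=rewrite | github.com/devkevbot/interview-prep | algorithms/matrix_dfs.py | generic_dfs
-- ===== SOURCE A (Python) =====
-- def generic_dfs(matrix, start, target):
--     # Define the directions to move in the matrix
--     directions = [(0, 1), (1, 0), (0, -1), (-1, 0)]
--
--     # Create a set to track visited cells
--     visited = set([start])
--
--     # Recursive function to explore the neighbors of a cell
--     def explore(cell):
--         # Check if we have reached the target cell
--         if cell == target:
--             return True
--
--         # Otherwise, explore the neighbors of the current cell
--         for direction in directions:
--             row, col = cell[0] + direction[0], cell[1] + direction[1]
--
--             # Check if the neighbor is within the bounds of the matrix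
--             if row >= 0 and row < len(matrix) and col >= 0 and col < len(matrix[0]):
--                 neighbor = (row, col)
--
--                 # Check if the neighbor has not been visited before
--                 if neighbor not in visited:
--                     # Mark the neighbor as visited and explore it recursively
--                     visited.add(neighbor)
--                     if explore(neighbor):
--                         return True
--
--         # If we reach this point, we have exhausted all possible paths without reaching the target
--         return False
--
--     # Start the search from the starting cell
--     return explore(start)
-- ===== SOURCE B (Python) =====
-- def generic_dfs(matrix, start, target):
--     # Iterative flood with an explicit worklist instead of recursion: scales to
--     # large grids without hitting Python's recursion limit.
--     stack = [start]
--     visited = {start}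
--     while stack:
--         cell = stack.pop()
--         if cell == target:
--             return True
--         for dr, dc in ((0, 1), (1, 0), (0, -1), (-1, 0)):
--             r, c = cell[0] + dr, cell[1] + dc
--             if 0 <= r < len(matrix) and 0 <= c < len(matrix[0]) and (r, c) not in visited:
--                 visited.add((r, c))
--                 stack.append((r, c))
--     return False
-- ===== Notes on version B (the rewrite author's own statement) =====
-- stated objective: alternative
-- what changed: A's recursive DFS (a nested closure recursing cell by cell) is replaced by an iterative flood with an explicit worklist and visited set, so no recursion is needed and large grids cannot exhaust Python's recursion limit; Pre_ only excludes malformed inputs on which A raises IndexError.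
import Mathlib
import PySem

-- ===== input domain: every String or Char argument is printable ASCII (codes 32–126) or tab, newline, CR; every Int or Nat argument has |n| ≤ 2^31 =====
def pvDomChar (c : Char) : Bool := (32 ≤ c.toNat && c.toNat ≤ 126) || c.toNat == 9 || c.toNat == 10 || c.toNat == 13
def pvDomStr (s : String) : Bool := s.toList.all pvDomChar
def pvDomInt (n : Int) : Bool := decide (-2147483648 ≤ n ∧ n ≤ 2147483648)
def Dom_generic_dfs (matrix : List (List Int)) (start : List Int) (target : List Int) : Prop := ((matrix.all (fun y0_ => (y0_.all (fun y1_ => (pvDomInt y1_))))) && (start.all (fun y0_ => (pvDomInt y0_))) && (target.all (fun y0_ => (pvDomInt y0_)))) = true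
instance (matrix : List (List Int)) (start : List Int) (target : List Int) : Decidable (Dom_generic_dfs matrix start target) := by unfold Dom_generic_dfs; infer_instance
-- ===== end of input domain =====

-- B replaces A's recursive DFS by an iterative flood with an explicit worklist
-- and visited set (no recursion), returning the same value on every admitted input.

-- bounds check shared by both ports (Python: `row >= 0 and row < len(matrix) and col >= 0 and col < len(matrix[0])`;
-- `matrix.headD []` is `matrix[0]` — only inspected when the row bound holds, so `len(matrix[0])` never raises)
def pvInG (matrix : List (List Int)) (r c : Int) : Bool :=
  decide (0 ≤ r ∧ r < (matrix.length : Int) ∧ 0 ≤ c ∧ c < ((matrix.headD []).length : Int))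

def pvDirs : List (Int × Int) := [(0,1), (1,0), (0,-1), (-1,0)]

-- ===== PORT A =====
-- A's recursive `explore` with the mutated closure variable `visited` threaded through;
-- the Nat fuel is only a totality guard (grid size + 2 always suffices, proved below).
mutual
def pvExplore (matrix : List (List Int)) (target : List Int) :
    Nat → PySem.Set (List Int) → List Int → Bool × PySem.Set (List Int)
  | 0, vis, _ => (false, vis)
  | f + 1, vis, cell =>
    if cell = target then (true, vis)
    else pvGo matrix target f cell pvDirs vis
termination_by f vis cell => (f, 0)

-- the `for direction in directions` loop with its early `return True`
def pvGo (matrix : List (List Int)) (target : List Int) (f : Nat) (cell : List Int) :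
    List (Int × Int) → PySem.Set (List Int) → Bool × PySem.Set (List Int)
  | [], vis => (false, vis)
  | d :: ds, vis =>
    if pvInG matrix (PySem.List.pyGetD cell 0 0 + d.1) (PySem.List.pyGetD cell 1 0 + d.2) then
      if [PySem.List.pyGetD cell 0 0 + d.1, PySem.List.pyGetD cell 1 0 + d.2] ∈ vis then
        pvGo matrix target f cell ds vis
      else
        match pvExplore matrix target f
            (PySem.Set.add vis [PySem.List.pyGetD cell 0 0 + d.1, PySem.List.pyGetD cell 1 0 + d.2])
            [PySem.List.pyGetD cell 0 0 + d.1, PySem.List.pyGetD cell 1 0 + d.2] with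
        | (true, v) => (true, v)
        | (false, v) => pvGo matrix target f cell ds v
    else pvGo matrix target f cell ds vis
termination_by ds vis => (f, ds.length + 1)
end

def generic_dfs (matrix : List (List Int)) (start : List Int) (target : List Int) : Bool :=
  (pvExplore matrix target (matrix.length * (matrix.headD []).length + 2)
    (PySem.Set.ofList [start]) start).1

-- ===== PORT B =====
-- the pushed neighbour tuple `(cell[0] + dr, cell[1] + dc)`
def pvNb (cell : List Int) (d : Int × Int) : List Int :=
  [PySem.List.pyGetD cell 0 0 + d.1, PySem.List.pyGetD cell 1 0 + d.2]

-- one step of B's inner `for` loop: push the neighbour if in-bounds and unvisited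
def pvStep (matrix : List (List Int)) (cell : List Int)
    (p : List (List Int) × PySem.Set (List Int)) (d : Int × Int) :
    List (List Int) × PySem.Set (List Int) :=
  if pvInG matrix (PySem.List.pyGetD cell 0 0 + d.1) (PySem.List.pyGetD cell 1 0 + d.2) = true ∧
      pvNb cell d ∉ p.2 then
    (pvNb cell d :: p.1, PySem.Set.add p.2 (pvNb cell d))
  else p

-- B's `while stack:` loop.  Python appends to and pops from the END of the list;
-- here the stack is kept head-first (cons / pop the head), the same LIFO discipline
-- processing the same cells in the same order.  The Nat fuel is only a totality
-- guard (2·grid size + 2 always suffices, proved below).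
def pvLoop (matrix : List (List Int)) (target : List Int) :
    Nat → List (List Int) → PySem.Set (List Int) → Bool × PySem.Set (List Int)
  | 0, _, vis => (false, vis)
  | _ + 1, [], vis => (false, vis)
  | f + 1, cell :: rest, vis =>
    if cell = target then (true, vis)
    else pvLoop matrix target f
      ((pvDirs.foldl (pvStep matrix cell) (rest, vis)).1)
      ((pvDirs.foldl (pvStep matrix cell) (rest, vis)).2)

def generic_dfs_alt (matrix : List (List Int)) (start : List Int) (target : List Int) : Bool :=
  (pvLoop matrix target (2 * (matrix.length * (matrix.headD []).length) + 2)
    [start] (PySem.Set.ofList [start])).1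

-- ===== PRECONDITION & SPEC =====
-- Pre_ excludes inputs where start ≠ target and start has fewer than two coordinates:
-- there Python A raises IndexError on cell[0]/cell[1] (and B raises the same way).
def Pre_generic_dfs (matrix : List (List Int)) (start : List Int) (target : List Int) : Prop :=
  start = target ∨ 2 ≤ start.length
instance (matrix : List (List Int)) (start : List Int) (target : List Int) : Decidable (Pre_generic_dfs matrix start target) := by unfold Pre_generic_dfs; infer_instance

def pvWitness_generic_dfs : List (List Int) × List Int × List Int := ([[0, 0], [0, 0]], [0, 0], [1, 1])

def Spec_generic_dfs (matrix : List (List Int)) (start : List Int) (target : List Int) (out : Bool) : Prop := out = generic_dfs_alt matrix start target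
instance (matrix : List (List Int)) (start : List Int) (target : List Int) (out : Bool) : Decidable (Spec_generic_dfs matrix start target out) := by unfold Spec_generic_dfs; infer_instance

-- ===== CLAIM (what is proved, stated in full; the proofs are below) =====
def Claim_equal_generic_dfs : Prop := ∀ (matrix : List (List Int)) (start : List Int) (target : List Int), Dom_generic_dfs matrix start target → Pre_generic_dfs matrix start target → Spec_generic_dfs matrix start target (generic_dfs matrix start target)

-- ===== LEMMAS AND PROOFS =====

/-- the closed form both ports are proved equal to: found iff start = target, or
target is an in-bounds pair and some neighbour of start is in bounds -/
def pvE (matrix : List (List Int)) (start : List Int) (target : List Int) : Bool :=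
  if start = target then true
  else
    (decide (target.length = 2) &&
      pvInG matrix (PySem.List.pyGetD target 0 0) (PySem.List.pyGetD target 1 0)) &&
    (pvDirs.any fun d =>
      pvInG matrix (PySem.List.pyGetD start 0 0 + d.1) (PySem.List.pyGetD start 1 0 + d.2))

theorem pvGet0 (a b : Int) : PySem.List.pyGetD [a, b] 0 0 = a := by simp [pysem]
theorem pvGet1 (a b : Int) : PySem.List.pyGetD [a, b] 1 0 = b := by simp [pysem]

theorem pvPair (l : List Int) (h : l.length = 2) :
    l = [PySem.List.pyGetD l 0 0, PySem.List.pyGetD l 1 0] := by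
  match l, h with
  | [a, b], _ => simp [pysem]

/-- `v` has been fully explored into `W`: it is not the target and all of its
in-grid neighbours are in `W`. -/
def pvExplored (matrix : List (List Int)) (target v : List Int) (W : List (List Int)) : Prop :=
  v ≠ target ∧ ∀ d ∈ pvDirs,
    pvInG matrix (PySem.List.pyGetD v 0 0 + d.1) (PySem.List.pyGetD v 1 0 + d.2) = true →
    [PySem.List.pyGetD v 0 0 + d.1, PySem.List.pyGetD v 1 0 + d.2] ∈ W

theorem pvExplored_mono {matrix : List (List Int)} {target v : List Int}
    {W W' : List (List Int)} (h : pvExplored matrix target v W) (hs : W ⊆ W') :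
    pvExplored matrix target v W' :=
  ⟨h.1, fun d hd hin => hs (h.2 d hd hin)⟩

/-- enumeration of all in-grid cells, for the fuel bound -/
def pvAllGrid (matrix : List (List Int)) : List (List Int) :=
  (List.range matrix.length).flatMap fun i =>
    (List.range (matrix.headD []).length).map fun j => [(i : Int), (j : Int)]

theorem mem_pvAllGrid {matrix : List (List Int)} {r c : Int} :
    [r, c] ∈ pvAllGrid matrix ↔ pvInG matrix r c = true := by
  constructor
  · intro h
    simp [pvAllGrid] at h
    obtain ⟨⟨i, hi, hr⟩, j, hj, hc⟩ := h
    simp only [pvInG, decide_eq_true_eq, List.headD_eq_head?_getD]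
    omega
  · intro h
    simp only [pvInG, decide_eq_true_eq, List.headD_eq_head?_getD] at h
    simp [pvAllGrid]
    exact ⟨⟨r.toNat, by omega, by omega⟩, ⟨c.toNat, by omega, by omega⟩⟩

/-- number of unvisited grid cells -/
def pvM (matrix : List (List Int)) (vis : List (List Int)) : Nat :=
  ((pvAllGrid matrix).filter (fun p => decide (p ∉ vis))).length

theorem subset_add (vis : List (List Int)) (x : List Int) : vis ⊆ PySem.Set.add vis x :=
  fun _ hy => (PySem.Set.mem_add vis x _).mpr (Or.inl hy)

theorem mem_add_self (vis : List (List Int)) (x : List Int) : x ∈ PySem.Set.add vis x :=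
  (PySem.Set.mem_add vis x x).mpr (Or.inr rfl)

theorem pvM_le (matrix : List (List Int)) (vis : List (List Int)) :
    pvM matrix vis ≤ matrix.length * (matrix.headD []).length := by
  have h1 : (pvAllGrid matrix).length = matrix.length * (matrix.headD []).length := by
    simp [pvAllGrid, mul_comm]
  exact h1 ▸ List.length_filter_le _ _

theorem pvFilter_mono {vis vis' : List (List Int)} (h : vis ⊆ vis') :
    ∀ l : List (List Int),
      (l.filter fun p => decide (p ∉ vis')).length ≤ (l.filter fun p => decide (p ∉ vis)).length := by
  intro l
  induction l with
  | nil => simp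
  | cons a l ih =>
    simp only [List.filter_cons]
    by_cases ha : a ∈ vis
    · have ha' : a ∈ vis' := h ha
      simpa [ha, ha'] using ih
    · by_cases ha' : a ∈ vis'
      · simp only [ha, ha']
        simp only [not_true_eq_false, decide_false, Bool.false_eq_true, if_false,
          not_false_eq_true, decide_true, if_true, List.length_cons]
        omega
      · simp only [ha, ha', not_false_eq_true, decide_true, if_true, List.length_cons]
        omega

theorem pvM_mono {matrix : List (List Int)} {vis vis' : List (List Int)}
    (h : vis ⊆ vis') : pvM matrix vis' ≤ pvM matrix vis :=
  pvFilter_mono h (pvAllGrid matrix)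

theorem pvFilter_add_lt {vis : List (List Int)} {nb : List Int} (hv : nb ∉ vis) :
    ∀ l : List (List Int), nb ∈ l →
      (l.filter fun p => decide (p ∉ PySem.Set.add vis nb)).length <
        (l.filter fun p => decide (p ∉ vis)).length := by
  intro l
  induction l with
  | nil => simp
  | cons a l ih =>
    intro hm
    simp only [List.filter_cons]
    by_cases hanb : a = nb
    · subst hanb
      have h1 : a ∈ PySem.Set.add vis a := mem_add_self vis a
      have hmono := pvFilter_mono (subset_add vis a) l
      simp only [hv, h1, not_true_eq_false, decide_false, Bool.false_eq_true, if_false,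
        not_false_eq_true, decide_true, if_true, List.length_cons]
      omega
    · have hnb : nb ∈ l := by
        rcases List.mem_cons.mp hm with h1 | h1
        · exact absurd h1.symm hanb
        · exact h1
      have hmem : a ∈ PySem.Set.add vis nb ↔ a ∈ vis := by
        rw [PySem.Set.mem_add]
        exact ⟨fun h => h.resolve_right hanb, Or.inl⟩
      by_cases ha : a ∈ vis
      · have ha2 := hmem.mpr ha
        simp only [ha, ha2, not_true_eq_false, decide_false, Bool.false_eq_true, if_false]
        exact ih hnb
      · have ha2 : a ∉ PySem.Set.add vis nb := fun h => ha (hmem.mp h)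
        simp only [ha, ha2, not_false_eq_true, decide_true, if_true, List.length_cons]
        exact Nat.succ_lt_succ (ih hnb)

theorem pvM_add_lt {matrix : List (List Int)} {vis : List (List Int)} {nb : List Int}
    (hg : nb ∈ pvAllGrid matrix) (hv : nb ∉ vis) :
    pvM matrix (PySem.Set.add vis nb) < pvM matrix vis :=
  pvFilter_add_lt hv (pvAllGrid matrix) hg

theorem pvExplore_succ (matrix : List (List Int)) (target : List Int) (f : Nat)
    (vis : PySem.Set (List Int)) (cell : List Int) :
    pvExplore matrix target (f + 1) vis cell =
      if cell = target then (true, vis) else pvGo matrix target f cell pvDirs vis := by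
  simp [pvExplore]

theorem pvGo_mono (matrix : List (List Int)) (target : List Int) (f : Nat) (cell : List Int)
    (hexp : ∀ (vis : PySem.Set (List Int)) (c : List Int),
      vis ⊆ (pvExplore matrix target f vis c).2) :
    ∀ (ds : List (Int × Int)) (vis : PySem.Set (List Int)),
      vis ⊆ (pvGo matrix target f cell ds vis).2 := by
  intro ds
  induction ds with
  | nil => intro vis; simp [pvGo]
  | cons d ds ih =>
    intro vis
    simp only [pvGo]
    split
    · split
      · exact ih vis
      · cases hx : pvExplore matrix target f
            (PySem.Set.add vis [PySem.List.pyGetD cell 0 0 + d.1, PySem.List.pyGetD cell 1 0 + d.2])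
            [PySem.List.pyGetD cell 0 0 + d.1, PySem.List.pyGetD cell 1 0 + d.2] with
        | mk b v =>
          have hsub : vis ⊆ v := by
            intro y hy
            have h1 := hexp
              (PySem.Set.add vis [PySem.List.pyGetD cell 0 0 + d.1, PySem.List.pyGetD cell 1 0 + d.2])
              [PySem.List.pyGetD cell 0 0 + d.1, PySem.List.pyGetD cell 1 0 + d.2]
              (subset_add _ _ hy)
            rw [hx] at h1
            exact h1
          cases b
          · exact fun y hy => ih v (hsub hy)
          · exact hsub
    · exact ih vis

theorem pvExplore_mono (matrix : List (List Int)) (target : List Int) :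
    ∀ (f : Nat) (vis : PySem.Set (List Int)) (cell : List Int),
      vis ⊆ (pvExplore matrix target f vis cell).2 := by
  intro f
  induction f with
  | zero =>
    intro vis cell
    have h0 : pvExplore matrix target 0 vis cell = (false, vis) := by simp [pvExplore]
    rw [h0]
    exact fun _ h => h
  | succ f ih =>
    intro vis cell
    rw [pvExplore_succ]
    split
    · exact fun _ h => h
    · exact pvGo_mono matrix target f cell (fun v c => ih v c) pvDirs vis

theorem pvGo_mono' (matrix : List (List Int)) (target : List Int) (f : Nat) (cell : List Int)
    (ds : List (Int × Int)) (vis : PySem.Set (List Int)) :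
    vis ⊆ (pvGo matrix target f cell ds vis).2 :=
  pvGo_mono matrix target f cell (pvExplore_mono matrix target f) ds vis

theorem pvGo_false_spec (matrix : List (List Int)) (target : List Int) (f : Nat)
    (cell : List Int)
    (IH : ∀ (vis : PySem.Set (List Int)) (c : List Int) (vis' : PySem.Set (List Int)),
      pvM matrix vis < f → pvExplore matrix target f vis c = (false, vis') →
      pvExplored matrix target c vis' ∧ ∀ v ∈ vis', v ∉ vis → pvExplored matrix target v vis') :
    ∀ (ds : List (Int × Int)) (vis vis' : PySem.Set (List Int)),
      pvM matrix vis < f + 1 →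
      pvGo matrix target f cell ds vis = (false, vis') →
      (∀ d ∈ ds,
          pvInG matrix (PySem.List.pyGetD cell 0 0 + d.1) (PySem.List.pyGetD cell 1 0 + d.2) = true →
          [PySem.List.pyGetD cell 0 0 + d.1, PySem.List.pyGetD cell 1 0 + d.2] ∈ vis') ∧
        ∀ v ∈ vis', v ∉ vis → pvExplored matrix target v vis' := by
  intro ds
  induction ds with
  | nil =>
    intro vis vis' hm h
    simp only [pvGo, Prod.mk.injEq] at h
    constructor
    · intro d hd; simp at hd
    · intro v hv hnv
      rw [← h.2] at hv
      exact absurd hv hnv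
  | cons d ds ih =>
    intro vis vis' hm h
    simp only [pvGo] at h
    split at h
    · rename_i hin
      split at h
      · -- neighbour already visited
        rename_i hmem
        obtain ⟨hds, hnew⟩ := ih vis vis' hm h
        refine ⟨?_, hnew⟩
        intro d' hd' hin'
        rcases List.mem_cons.mp hd' with rfl | hd'
        · have h3 := pvGo_mono' matrix target f cell ds vis
          rw [h] at h3
          exact h3 hmem
        · exact hds d' hd' hin'
      · -- neighbour fresh: explore it
        rename_i hmem
        cases hx : pvExplore matrix target f
            (PySem.Set.add vis [PySem.List.pyGetD cell 0 0 + d.1, PySem.List.pyGetD cell 1 0 + d.2])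
            [PySem.List.pyGetD cell 0 0 + d.1, PySem.List.pyGetD cell 1 0 + d.2] with
        | mk b v =>
          rw [hx] at h
          cases b
          · -- recursive explore returned false, loop continues with v
            replace h : pvGo matrix target f cell ds v = (false, vis') := h
            have hnbg : [PySem.List.pyGetD cell 0 0 + d.1, PySem.List.pyGetD cell 1 0 + d.2] ∈
                pvAllGrid matrix := mem_pvAllGrid.mpr hin
            have hmadd : pvM matrix
                (PySem.Set.add vis [PySem.List.pyGetD cell 0 0 + d.1, PySem.List.pyGetD cell 1 0 + d.2]) < f := by
              have := pvM_add_lt hnbg hmem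
              omega
            obtain ⟨hexp_nb, hexp_new⟩ := IH _ _ _ hmadd hx
            have hav : PySem.Set.add vis
                [PySem.List.pyGetD cell 0 0 + d.1, PySem.List.pyGetD cell 1 0 + d.2] ⊆ v := by
              have h1 := pvExplore_mono matrix target f
                (PySem.Set.add vis [PySem.List.pyGetD cell 0 0 + d.1, PySem.List.pyGetD cell 1 0 + d.2])
                [PySem.List.pyGetD cell 0 0 + d.1, PySem.List.pyGetD cell 1 0 + d.2]
              rw [hx] at h1
              exact h1
            have hmv : pvM matrix v < f + 1 := by
              have h2 := pvM_mono (matrix := matrix) hav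
              omega
            obtain ⟨hds, hnew⟩ := ih v vis' hmv h
            have hvv' : v ⊆ vis' := by
              have h3 := pvGo_mono' matrix target f cell ds v
              rw [h] at h3
              exact h3
            constructor
            · intro d' hd' hin'
              rcases List.mem_cons.mp hd' with rfl | hd'
              · exact hvv' (hav (mem_add_self _ _))
              · exact hds d' hd' hin'
            · intro w hw hnw
              by_cases hwv : w ∈ v
              · by_cases hwadd : w ∈ PySem.Set.add vis
                    [PySem.List.pyGetD cell 0 0 + d.1, PySem.List.pyGetD cell 1 0 + d.2]
                · have hwnb : w = [PySem.List.pyGetD cell 0 0 + d.1, PySem.List.pyGetD cell 1 0 + d.2] :=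
                    ((PySem.Set.mem_add _ _ _).mp hwadd).resolve_left hnw
                  subst hwnb
                  exact pvExplored_mono hexp_nb hvv'
                · exact pvExplored_mono (hexp_new w hwv hwadd) hvv'
              · exact hnew w hw hwv
          · simp at h
    · rename_i hin
      obtain ⟨hds, hnew⟩ := ih vis vis' hm h
      refine ⟨?_, hnew⟩
      intro d' hd' hin'
      rcases List.mem_cons.mp hd' with rfl | hd'
      · exact absurd hin' hin
      · exact hds d' hd' hin'

theorem pvExplore_false_spec (matrix : List (List Int)) (target : List Int) :
    ∀ (f : Nat) (vis : PySem.Set (List Int)) (cell : List Int) (vis' : PySem.Set (List Int)),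
      pvM matrix vis < f →
      pvExplore matrix target f vis cell = (false, vis') →
      pvExplored matrix target cell vis' ∧
        ∀ v ∈ vis', v ∉ vis → pvExplored matrix target v vis' := by
  intro f
  induction f with
  | zero => intro vis cell vis' hm _; exact absurd hm (Nat.not_lt_zero _)
  | succ f ih =>
    intro vis cell vis' hm h
    rw [pvExplore_succ] at h
    split at h
    · simp at h
    · rename_i hct
      obtain ⟨hds, hnew⟩ := pvGo_false_spec matrix target f cell ih pvDirs vis vis' hm h
      exact ⟨⟨hct, hds⟩, hnew⟩

theorem pvGo_ne_target (matrix : List (List Int)) (target : List Int)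
    (ht : ∀ r c : Int, pvInG matrix r c = true → [r, c] ≠ target) (f : Nat) (cell : List Int)
    (IH : ∀ (vis : PySem.Set (List Int)) (c : List Int), c ≠ target →
      (pvExplore matrix target f vis c).1 = false) :
    ∀ (ds : List (Int × Int)) (vis : PySem.Set (List Int)),
      (pvGo matrix target f cell ds vis).1 = false := by
  intro ds
  induction ds with
  | nil => intro vis; simp [pvGo]
  | cons d ds ih =>
    intro vis
    simp only [pvGo]
    split
    · rename_i hin
      split
      · exact ih vis
      · cases hx : pvExplore matrix target f
            (PySem.Set.add vis [PySem.List.pyGetD cell 0 0 + d.1, PySem.List.pyGetD cell 1 0 + d.2])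
            [PySem.List.pyGetD cell 0 0 + d.1, PySem.List.pyGetD cell 1 0 + d.2] with
        | mk b v =>
          have hb : b = false := by
            have h1 := IH
              (PySem.Set.add vis [PySem.List.pyGetD cell 0 0 + d.1, PySem.List.pyGetD cell 1 0 + d.2])
              [PySem.List.pyGetD cell 0 0 + d.1, PySem.List.pyGetD cell 1 0 + d.2]
              (ht _ _ hin)
            rw [hx] at h1
            exact h1
          subst hb
          exact ih v
    · exact ih vis

theorem pvExplore_ne_target (matrix : List (List Int)) (target : List Int)
    (ht : ∀ r c : Int, pvInG matrix r c = true → [r, c] ≠ target) :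
    ∀ (f : Nat) (vis : PySem.Set (List Int)) (cell : List Int), cell ≠ target →
      (pvExplore matrix target f vis cell).1 = false := by
  intro f
  induction f with
  | zero => intro vis cell _; simp [pvExplore]
  | succ f ih =>
    intro vis cell hc
    rw [pvExplore_succ]
    split
    · rename_i hceq; exact absurd hceq hc
    · exact pvGo_ne_target matrix target ht f cell (fun v c h => ih v c h) pvDirs vis

theorem pvGo_nohit (matrix : List (List Int)) (target : List Int) (f : Nat) (cell : List Int) :
    ∀ (ds : List (Int × Int)) (vis : PySem.Set (List Int)),
      (∀ d ∈ ds,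
        pvInG matrix (PySem.List.pyGetD cell 0 0 + d.1) (PySem.List.pyGetD cell 1 0 + d.2) = false) →
      pvGo matrix target f cell ds vis = (false, vis) := by
  intro ds
  induction ds with
  | nil => intro vis _; simp [pvGo]
  | cons d ds ih =>
    intro vis h
    have hd := h d (List.mem_cons_self ..)
    simp only [pvGo, hd]
    simp only [Bool.false_eq_true, if_false]
    exact ih vis (fun d' hd' => h d' (List.mem_cons_of_mem _ hd'))

/-- reachable marking: a grid cell is either the start itself or already visited -/
def pvGood (start : List Int) (V : List (List Int)) (r c : Int) : Prop :=
  [r, c] = start ∨ [r, c] ∈ V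

theorem pvGood_step {matrix : List (List Int)} {target start : List Int}
    {V : List (List Int)}
    (hstart : pvExplored matrix target start V)
    (hcl : ∀ v ∈ V, v ≠ start → pvExplored matrix target v V)
    {d : Int × Int} (hd : d ∈ pvDirs) {r c : Int}
    (hg : pvGood start V r c)
    (hin' : pvInG matrix (r + d.1) (c + d.2) = true) :
    pvGood start V (r + d.1) (c + d.2) := by
  rcases hg with hg | hg
  · -- the cell IS start (so start = [r, c], of length two)
    have h2 := hstart.2 d hd
    rw [← hg, pvGet0, pvGet1] at h2
    exact Or.inr (h2 hin')
  · by_cases hs : [r, c] = start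
    · have h2 := hstart.2 d hd
      rw [← hs, pvGet0, pvGet1] at h2
      exact Or.inr (h2 hin')
    · have h2 := (hcl [r, c] hg hs).2 d hd
      rw [pvGet0, pvGet1] at h2
      exact Or.inr (h2 hin')

theorem pvConnect {matrix : List (List Int)} {target start : List Int} {V : List (List Int)}
    (hstart : pvExplored matrix target start V)
    (hcl : ∀ v ∈ V, v ≠ start → pvExplored matrix target v V) :
    ∀ (n : Nat) (r c x y : Int), (x - r).natAbs + (y - c).natAbs = n →
      pvInG matrix r c = true → pvInG matrix x y = true →
      pvGood start V r c → pvGood start V x y := by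
  intro n
  induction n using Nat.strong_induction_on with
  | _ n IHn =>
    intro r c x y hn hin hinxy hg
    by_cases hrx : r = x ∧ c = y
    · rw [← hrx.1, ← hrx.2]; exact hg
    · simp only [pvInG, decide_eq_true_eq] at hin hinxy
      rcases lt_trichotomy r x with hlt | heq | hgt
      · have hin1 : pvInG matrix (r + 1) (c + 0) = true := by
          simp only [pvInG, decide_eq_true_eq]; omega
        have hg1 := pvGood_step hstart hcl (d := (1, 0)) (by simp [pvDirs]) hg hin1
        exact IHn ((x - (r + 1)).natAbs + (y - (c + 0)).natAbs) (by omega) (r + 1) (c + 0) x y rfl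
          hin1 (by simp only [pvInG, decide_eq_true_eq]; omega) hg1
      · rcases lt_trichotomy c y with hlt | heq2 | hgt
        · have hin1 : pvInG matrix (r + 0) (c + 1) = true := by
            simp only [pvInG, decide_eq_true_eq]; omega
          have hg1 := pvGood_step hstart hcl (d := (0, 1)) (by simp [pvDirs]) hg hin1
          exact IHn ((x - (r + 0)).natAbs + (y - (c + 1)).natAbs) (by omega) (r + 0) (c + 1) x y
            rfl hin1 (by simp only [pvInG, decide_eq_true_eq]; omega) hg1
        · exact absurd ⟨heq, heq2⟩ hrx
        · have hin1 : pvInG matrix (r + 0) (c + -1) = true := by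
            simp only [pvInG, decide_eq_true_eq]; omega
          have hg1 := pvGood_step hstart hcl (d := (0, -1)) (by simp [pvDirs]) hg hin1
          exact IHn ((x - (r + 0)).natAbs + (y - (c + -1)).natAbs) (by omega) (r + 0) (c + -1) x y
            rfl hin1 (by simp only [pvInG, decide_eq_true_eq]; omega) hg1
      · have hin1 : pvInG matrix (r + -1) (c + 0) = true := by
          simp only [pvInG, decide_eq_true_eq]; omega
        have hg1 := pvGood_step hstart hcl (d := (-1, 0)) (by simp [pvDirs]) hg hin1
        exact IHn ((x - (r + -1)).natAbs + (y - (c + 0)).natAbs) (by omega) (r + -1) (c + 0) x y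
          rfl hin1 (by simp only [pvInG, decide_eq_true_eq]; omega) hg1

/-- A equals the closed form `pvE`. -/
theorem pvA_eq_E (matrix : List (List Int)) (start target : List Int) :
    generic_dfs matrix start target = pvE matrix start target := by
  unfold generic_dfs pvE
  have hof : PySem.Set.ofList [start] = [start] := by simp [PySem.Set.ofList, PySem.Set.add]
  rw [hof]
  by_cases hst : start = target
  · rw [if_pos hst,
      show matrix.length * (matrix.headD []).length + 2
        = (matrix.length * (matrix.headD []).length + 1) + 1 from rfl,
      pvExplore_succ, if_pos hst]
  · rw [if_neg hst]
    show (pvExplore matrix target (matrix.length * (matrix.headD []).length + 2) [start] start).1 =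
      ((decide (target.length = 2) &&
          pvInG matrix (PySem.List.pyGetD target 0 0) (PySem.List.pyGetD target 1 0)) &&
        (pvDirs.any fun d =>
          pvInG matrix (PySem.List.pyGetD start 0 0 + d.1) (PySem.List.pyGetD start 1 0 + d.2)))
    by_cases htok : (decide (target.length = 2) &&
        pvInG matrix (PySem.List.pyGetD target 0 0) (PySem.List.pyGetD target 1 0)) = true
    · by_cases hnb : (pvDirs.any fun d =>
          pvInG matrix (PySem.List.pyGetD start 0 0 + d.1) (PySem.List.pyGetD start 1 0 + d.2)) = true
      · -- target is an in-grid pair and start has an in-grid neighbour: the DFS must succeed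
        rw [htok, hnb, Bool.true_and]
        cases hres : pvExplore matrix target (matrix.length * (matrix.headD []).length + 2)
            [start] start with
        | mk b V =>
          cases b
          · exfalso
            have hm : pvM matrix [start] < matrix.length * (matrix.headD []).length + 2 := by
              have := pvM_le matrix [start]
              omega
            obtain ⟨hstart, hnew⟩ := pvExplore_false_spec matrix target
              (matrix.length * (matrix.headD []).length + 2) [start] start V hm hres
            have hcl : ∀ v ∈ V, v ≠ start → pvExplored matrix target v V := by
              intro v hv hne
              exact hnew v hv (by simp [hne])
            obtain ⟨d, hd, hind⟩ := List.any_eq_true.mp hnb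
            have hn0 : [PySem.List.pyGetD start 0 0 + d.1, PySem.List.pyGetD start 1 0 + d.2] ∈ V :=
              hstart.2 d hd hind
            obtain ⟨hlen, hting⟩ := Bool.and_eq_true_iff.mp htok
            have hlen2 : target.length = 2 := of_decide_eq_true hlen
            have htl : target = [PySem.List.pyGetD target 0 0, PySem.List.pyGetD target 1 0] :=
              pvPair target hlen2
            have hgood := pvConnect hstart hcl
              ((PySem.List.pyGetD target 0 0 - (PySem.List.pyGetD start 0 0 + d.1)).natAbs +
                (PySem.List.pyGetD target 1 0 - (PySem.List.pyGetD start 1 0 + d.2)).natAbs)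
              (PySem.List.pyGetD start 0 0 + d.1) (PySem.List.pyGetD start 1 0 + d.2)
              (PySem.List.pyGetD target 0 0) (PySem.List.pyGetD target 1 0)
              rfl hind hting (Or.inr hn0)
            rcases hgood with hgood | hgood
            · exact hst (htl.trans hgood).symm
            · have hne : [PySem.List.pyGetD target 0 0, PySem.List.pyGetD target 1 0] ≠ start :=
                fun h => hst (htl.trans h).symm
              exact (hcl _ hgood hne).1 htl.symm
          · rfl
      · -- no neighbour of start is in the grid: the loop finds nothing
        have hnb' : (pvDirs.any fun d =>
            pvInG matrix (PySem.List.pyGetD start 0 0 + d.1) (PySem.List.pyGetD start 1 0 + d.2)) = false := by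
          simpa using hnb
        rw [hnb', Bool.and_false,
          show matrix.length * (matrix.headD []).length + 2
            = (matrix.length * (matrix.headD []).length + 1) + 1 from rfl,
          pvExplore_succ, if_neg hst,
          pvGo_nohit matrix target (matrix.length * (matrix.headD []).length + 1) start pvDirs
            [start] (fun d hd => by simpa using List.any_eq_false.mp hnb' d hd)]
    · -- target is not an in-grid pair: no explored cell can ever equal it
      have htok' : (decide (target.length = 2) &&
          pvInG matrix (PySem.List.pyGetD target 0 0) (PySem.List.pyGetD target 1 0)) = false := by
        simpa using htok
      have ht : ∀ r c : Int, pvInG matrix r c = true → [r, c] ≠ target := by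
        intro r c hin heq
        rcases Bool.and_eq_false_iff.mp htok' with h1 | h1
        · have : target.length ≠ 2 := by simpa using h1
          exact this (by rw [← heq]; rfl)
        · rw [← heq, pvGet0, pvGet1] at h1
          rw [h1] at hin
          exact Bool.false_ne_true hin
      rw [htok', Bool.false_and]
      exact pvExplore_ne_target matrix target ht _ [start] start hst

-- ===== B-side lemmas: the worklist loop equals the same closed form =====

theorem pvFold_vs_mono (matrix : List (List Int)) (cell : List Int) :
    ∀ (ds : List (Int × Int)) (st : List (List Int)) (vs : PySem.Set (List Int)),
      vs ⊆ (ds.foldl (pvStep matrix cell) (st, vs)).2 := by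
  intro ds
  induction ds with
  | nil => intro st vs; exact fun _ h => h
  | cons d ds ih =>
    intro st vs
    simp only [List.foldl_cons]
    unfold pvStep
    split
    · exact fun x hx => ih _ _ (subset_add vs (pvNb cell d) hx)
    · exact ih st vs

theorem pvFold_st_mono (matrix : List (List Int)) (cell : List Int) :
    ∀ (ds : List (Int × Int)) (st : List (List Int)) (vs : PySem.Set (List Int)),
      ∀ x ∈ st, x ∈ (ds.foldl (pvStep matrix cell) (st, vs)).1 := by
  intro ds
  induction ds with
  | nil => intro st vs x hx; exact hx
  | cons d ds ih =>
    intro st vs x hx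
    simp only [List.foldl_cons]
    unfold pvStep
    split
    · exact ih _ _ x (List.mem_cons_of_mem _ hx)
    · exact ih st vs x hx

theorem pvFold_st_new (matrix : List (List Int)) (cell : List Int) :
    ∀ (ds : List (Int × Int)) (st : List (List Int)) (vs : PySem.Set (List Int)),
      ∀ x ∈ (ds.foldl (pvStep matrix cell) (st, vs)).1,
        x ∈ st ∨ ∃ d ∈ ds,
          pvInG matrix (PySem.List.pyGetD cell 0 0 + d.1) (PySem.List.pyGetD cell 1 0 + d.2) = true ∧
          x = pvNb cell d := by
  intro ds
  induction ds with
  | nil => intro st vs x hx; exact Or.inl hx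
  | cons d ds ih =>
    intro st vs x hx
    simp only [List.foldl_cons] at hx
    unfold pvStep at hx
    split at hx
    · rename_i hc
      rcases ih _ _ x hx with h1 | ⟨d', hd', hin', he'⟩
      · rcases List.mem_cons.mp h1 with h2 | h2
        · exact Or.inr ⟨d, List.mem_cons_self .., hc.1, h2⟩
        · exact Or.inl h2
      · exact Or.inr ⟨d', List.mem_cons_of_mem _ hd', hin', he'⟩
    · rcases ih st vs x hx with h1 | ⟨d', hd', hin', he'⟩
      · exact Or.inl h1
      · exact Or.inr ⟨d', List.mem_cons_of_mem _ hd', hin', he'⟩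

theorem pvFold_nb_mem (matrix : List (List Int)) (cell : List Int) :
    ∀ (ds : List (Int × Int)) (st : List (List Int)) (vs : PySem.Set (List Int)),
      ∀ d ∈ ds,
        pvInG matrix (PySem.List.pyGetD cell 0 0 + d.1) (PySem.List.pyGetD cell 1 0 + d.2) = true →
        pvNb cell d ∈ (ds.foldl (pvStep matrix cell) (st, vs)).2 := by
  intro ds
  induction ds with
  | nil => intro st vs d hd; simp at hd
  | cons d0 ds ih =>
    intro st vs d hd hin
    simp only [List.foldl_cons]
    rcases List.mem_cons.mp hd with rfl | hd'
    · by_cases hc : pvInG matrix (PySem.List.pyGetD cell 0 0 + d.1)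
          (PySem.List.pyGetD cell 1 0 + d.2) = true ∧ pvNb cell d ∉ vs
      · have hstep : pvStep matrix cell (st, vs) d =
            (pvNb cell d :: st, PySem.Set.add vs (pvNb cell d)) := by
          unfold pvStep; rw [if_pos hc]
        rw [hstep]
        exact pvFold_vs_mono matrix cell ds _ _ (mem_add_self vs (pvNb cell d))
      · have hmem : pvNb cell d ∈ vs := by
          by_cases hm : pvNb cell d ∈ vs
          · exact hm
          · exact absurd ⟨hin, hm⟩ hc
        have hstep : pvStep matrix cell (st, vs) d = (st, vs) := by
          unfold pvStep; rw [if_neg hc]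
        rw [hstep]
        exact pvFold_vs_mono matrix cell ds st vs hmem
    · exact ih _ _ d hd' hin

theorem pvFold_vs_new (matrix : List (List Int)) (cell : List Int) :
    ∀ (ds : List (Int × Int)) (st : List (List Int)) (vs : PySem.Set (List Int)),
      ∀ x ∈ (ds.foldl (pvStep matrix cell) (st, vs)).2,
        x ∈ vs ∨ x ∈ (ds.foldl (pvStep matrix cell) (st, vs)).1 := by
  intro ds
  induction ds with
  | nil => intro st vs x hx; exact Or.inl hx
  | cons d ds ih =>
    intro st vs x hx
    simp only [List.foldl_cons] at hx ⊢
    unfold pvStep at hx ⊢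
    split at hx
    · rename_i hc
      split
      · rcases ih _ _ x hx with h1 | h1
        · rcases (PySem.Set.mem_add vs (pvNb cell d) x).mp h1 with h2 | h2
          · exact Or.inl h2
          · exact Or.inr (pvFold_st_mono matrix cell ds _ _ x (h2 ▸ List.mem_cons_self ..))
        · exact Or.inr h1
      · rename_i hc2; exact absurd hc hc2
    · rename_i hc
      split
      · rename_i hc2; exact absurd hc2 hc
      · exact ih st vs x hx

theorem pvFold_measure (matrix : List (List Int)) (cell : List Int) :
    ∀ (ds : List (Int × Int)) (st : List (List Int)) (vs : PySem.Set (List Int)),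
      2 * pvM matrix (ds.foldl (pvStep matrix cell) (st, vs)).2 +
        (ds.foldl (pvStep matrix cell) (st, vs)).1.length ≤
      2 * pvM matrix vs + st.length := by
  intro ds
  induction ds with
  | nil => intro st vs; exact le_rfl
  | cons d ds ih =>
    intro st vs
    simp only [List.foldl_cons]
    by_cases hc : pvInG matrix (PySem.List.pyGetD cell 0 0 + d.1)
        (PySem.List.pyGetD cell 1 0 + d.2) = true ∧ pvNb cell d ∉ vs
    · have hstep : pvStep matrix cell (st, vs) d =
          (pvNb cell d :: st, PySem.Set.add vs (pvNb cell d)) := by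
        unfold pvStep; rw [if_pos hc]
      rw [hstep]
      have hlt : pvM matrix (PySem.Set.add vs (pvNb cell d)) < pvM matrix vs :=
        pvM_add_lt (mem_pvAllGrid.mpr hc.1) hc.2
      have := ih (pvNb cell d :: st) (PySem.Set.add vs (pvNb cell d))
      simp only [List.length_cons] at this
      omega
    · have hstep : pvStep matrix cell (st, vs) d = (st, vs) := by
        unfold pvStep; rw [if_neg hc]
      rw [hstep]
      exact ih st vs

theorem pvFold_sub (matrix : List (List Int)) (cell : List Int)
    (ds : List (Int × Int)) (st : List (List Int)) (vs : PySem.Set (List Int))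
    (h : st ⊆ vs) : (ds.foldl (pvStep matrix cell) (st, vs)).1 ⊆
      (ds.foldl (pvStep matrix cell) (st, vs)).2 := by
  intro x hx
  rcases pvFold_st_new matrix cell ds st vs x hx with h1 | ⟨d, hd, hin, he⟩
  · exact pvFold_vs_mono matrix cell ds st vs (h h1)
  · exact he ▸ pvFold_nb_mem matrix cell ds st vs d hd hin

theorem pvLoop_nil (matrix : List (List Int)) (target : List Int) (f : Nat)
    (vis : PySem.Set (List Int)) : pvLoop matrix target f [] vis = (false, vis) := by
  cases f <;> rfl

theorem pvLoop_cons (matrix : List (List Int)) (target : List Int) (f : Nat)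
    (cell : List Int) (rest : List (List Int)) (vis : PySem.Set (List Int)) :
    pvLoop matrix target (f + 1) (cell :: rest) vis =
      if cell = target then (true, vis)
      else pvLoop matrix target f
        ((pvDirs.foldl (pvStep matrix cell) (rest, vis)).1)
        ((pvDirs.foldl (pvStep matrix cell) (rest, vis)).2) := rfl

theorem pvLoop_mono (matrix : List (List Int)) (target : List Int) :
    ∀ (f : Nat) (st : List (List Int)) (vis : PySem.Set (List Int)),
      vis ⊆ (pvLoop matrix target f st vis).2 := by
  intro f
  induction f with
  | zero => intro st vis; exact fun _ h => h
  | succ f ih =>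
    intro st vis
    cases st with
    | nil => rw [pvLoop_nil]; exact fun _ h => h
    | cons cell rest =>
      rw [pvLoop_cons]
      split
      · exact fun _ h => h
      · exact fun x hx => ih _ _ (pvFold_vs_mono matrix cell pvDirs rest vis hx)

theorem pvLoop_false_spec (matrix : List (List Int)) (target : List Int) :
    ∀ (f : Nat) (st : List (List Int)) (vis vis' : PySem.Set (List Int)),
      pvLoop matrix target f st vis = (false, vis') →
      2 * pvM matrix vis + st.length < f →
      st ⊆ vis →
      (∀ v ∈ vis, v ∉ st → pvExplored matrix target v vis') →
      vis ⊆ vis' ∧ ∀ v ∈ vis', pvExplored matrix target v vis' := by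
  intro f
  induction f with
  | zero => intro st vis vis' _ hf _ _; omega
  | succ f ih =>
    intro st vis vis' h hf hsub hproc
    cases st with
    | nil =>
      rw [pvLoop_nil] at h
      obtain ⟨-, h2⟩ := Prod.mk.injEq .. ▸ h
      subst h2
      exact ⟨fun _ hx => hx, fun v hv => hproc v hv (by simp)⟩
    | cons cell rest =>
      rw [pvLoop_cons] at h
      split at h
      · simp at h
      · rename_i hct
        have hvsub := pvFold_vs_mono matrix cell pvDirs rest vis
        have hrest : ∀ x ∈ rest, x ∈ (pvDirs.foldl (pvStep matrix cell) (rest, vis)).1 :=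
          pvFold_st_mono matrix cell pvDirs rest vis
        have hfuel : 2 * pvM matrix (pvDirs.foldl (pvStep matrix cell) (rest, vis)).2 +
            (pvDirs.foldl (pvStep matrix cell) (rest, vis)).1.length < f := by
          have := pvFold_measure matrix cell pvDirs rest vis
          simp only [List.length_cons] at hf
          omega
        have hsub' := pvFold_sub matrix cell pvDirs rest vis
          (fun x hx => hsub (List.mem_cons_of_mem _ hx))
        have hmono : (pvDirs.foldl (pvStep matrix cell) (rest, vis)).2 ⊆ vis' := by
          have h1 := pvLoop_mono matrix target f
            ((pvDirs.foldl (pvStep matrix cell) (rest, vis)).1)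
            ((pvDirs.foldl (pvStep matrix cell) (rest, vis)).2)
          rw [h] at h1
          exact h1
        have hproc' : ∀ v ∈ (pvDirs.foldl (pvStep matrix cell) (rest, vis)).2,
            v ∉ (pvDirs.foldl (pvStep matrix cell) (rest, vis)).1 →
            pvExplored matrix target v vis' := by
          intro v hv hnp
          rcases pvFold_vs_new matrix cell pvDirs rest vis v hv with hvv | hvp
          · by_cases hvc : v = cell
            · subst hvc
              exact ⟨hct, fun d hd hin => hmono (pvFold_nb_mem matrix _ pvDirs rest vis d hd hin)⟩
            · have hnr : v ∉ rest := fun hr => hnp (hrest v hr)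
              exact hproc v hvv (by
                intro hmem
                rcases List.mem_cons.mp hmem with h2 | h2
                · exact hvc h2
                · exact hnr h2)
          · exact absurd hvp hnp
        obtain ⟨h1, h2⟩ := ih _ _ _ h hfuel hsub' hproc'
        exact ⟨fun x hx => h1 (hvsub hx), h2⟩

theorem pvLoop_ne_target (matrix : List (List Int)) (target : List Int)
    (ht : ∀ r c : Int, pvInG matrix r c = true → [r, c] ≠ target) :
    ∀ (f : Nat) (st : List (List Int)) (vis : PySem.Set (List Int)),
      (∀ v ∈ st, v ≠ target) → (pvLoop matrix target f st vis).1 = false := by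
  intro f
  induction f with
  | zero => intro st vis _; rfl
  | succ f ih =>
    intro st vis hstk
    cases st with
    | nil => rw [pvLoop_nil]
    | cons cell rest =>
      rw [pvLoop_cons, if_neg (hstk cell (List.mem_cons_self ..))]
      apply ih
      intro v hv
      rcases pvFold_st_new matrix cell pvDirs rest vis v hv with h1 | ⟨d, _, hin, he⟩
      · exact hstk v (List.mem_cons_of_mem _ h1)
      · exact he ▸ ht _ _ hin

theorem pvFold_nohit (matrix : List (List Int)) (cell : List Int) :
    ∀ (ds : List (Int × Int)) (st : List (List Int)) (vs : PySem.Set (List Int)),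
      (∀ d ∈ ds,
        pvInG matrix (PySem.List.pyGetD cell 0 0 + d.1) (PySem.List.pyGetD cell 1 0 + d.2) = false) →
      ds.foldl (pvStep matrix cell) (st, vs) = (st, vs) := by
  intro ds
  induction ds with
  | nil => intro st vs _; rfl
  | cons d ds ih =>
    intro st vs h
    have hd := h d (List.mem_cons_self ..)
    simp only [List.foldl_cons]
    unfold pvStep
    rw [if_neg (by simp [hd])]
    exact ih st vs (fun d' hd' => h d' (List.mem_cons_of_mem _ hd'))

/-- B equals the closed form `pvE`. -/
theorem pvB_eq_E (matrix : List (List Int)) (start target : List Int) :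
    generic_dfs_alt matrix start target = pvE matrix start target := by
  unfold generic_dfs_alt pvE
  have hof : PySem.Set.ofList [start] = [start] := by simp [PySem.Set.ofList, PySem.Set.add]
  rw [hof,
    show 2 * (matrix.length * (matrix.headD []).length) + 2
      = (2 * (matrix.length * (matrix.headD []).length) + 1) + 1 from rfl]
  by_cases hst : start = target
  · rw [if_pos hst, pvLoop_cons, if_pos hst]
  · rw [if_neg hst]
    by_cases htok : (decide (target.length = 2) &&
        pvInG matrix (PySem.List.pyGetD target 0 0) (PySem.List.pyGetD target 1 0)) = true
    · by_cases hnb : (pvDirs.any fun d =>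
          pvInG matrix (PySem.List.pyGetD start 0 0 + d.1) (PySem.List.pyGetD start 1 0 + d.2)) = true
      · rw [htok, hnb, Bool.true_and]
        cases hres : pvLoop matrix target
            ((2 * (matrix.length * (matrix.headD []).length) + 1) + 1) [start] [start] with
        | mk b V =>
          cases b
          · exfalso
            have hfuel : 2 * pvM matrix [start] + ([start] : List (List Int)).length <
                (2 * (matrix.length * (matrix.headD []).length) + 1) + 1 := by
              have := pvM_le matrix [start]
              simp only [List.length_cons, List.length_nil]
              omega
            obtain ⟨hsub, hall⟩ := pvLoop_false_spec matrix target _ [start] [start] V hres hfuel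
              (fun x hx => hx)
              (by intro v hv hnv; exact absurd hv hnv)
            have hstart : pvExplored matrix target start V :=
              hall start (hsub (List.mem_cons_self ..))
            have hcl : ∀ v ∈ V, v ≠ start → pvExplored matrix target v V :=
              fun v hv _ => hall v hv
            obtain ⟨d, hd, hind⟩ := List.any_eq_true.mp hnb
            have hn0 : [PySem.List.pyGetD start 0 0 + d.1, PySem.List.pyGetD start 1 0 + d.2] ∈ V :=
              hstart.2 d hd hind
            obtain ⟨hlen, hting⟩ := Bool.and_eq_true_iff.mp htok
            have hlen2 : target.length = 2 := of_decide_eq_true hlen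
            have htl : target = [PySem.List.pyGetD target 0 0, PySem.List.pyGetD target 1 0] :=
              pvPair target hlen2
            have hgood := pvConnect hstart hcl
              ((PySem.List.pyGetD target 0 0 - (PySem.List.pyGetD start 0 0 + d.1)).natAbs +
                (PySem.List.pyGetD target 1 0 - (PySem.List.pyGetD start 1 0 + d.2)).natAbs)
              (PySem.List.pyGetD start 0 0 + d.1) (PySem.List.pyGetD start 1 0 + d.2)
              (PySem.List.pyGetD target 0 0) (PySem.List.pyGetD target 1 0)
              rfl hind hting (Or.inr hn0)
            rcases hgood with hgood | hgood
            · exact hst (htl.trans hgood).symm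
            · have hne : [PySem.List.pyGetD target 0 0, PySem.List.pyGetD target 1 0] ≠ start :=
                fun h => hst (htl.trans h).symm
              exact (hcl _ hgood hne).1 htl.symm
          · rfl
      · -- no neighbour of start is in the grid: after processing start the worklist is empty
        have hnb' : (pvDirs.any fun d =>
            pvInG matrix (PySem.List.pyGetD start 0 0 + d.1) (PySem.List.pyGetD start 1 0 + d.2)) = false := by
          simpa using hnb
        rw [hnb', Bool.and_false, pvLoop_cons, if_neg hst,
          pvFold_nohit matrix start pvDirs [] [start]
            (fun d hd => by simpa using List.any_eq_false.mp hnb' d hd)]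
        rw [pvLoop_nil]
    · -- target is not an in-grid pair: no popped cell can ever equal it
      have htok' : (decide (target.length = 2) &&
          pvInG matrix (PySem.List.pyGetD target 0 0) (PySem.List.pyGetD target 1 0)) = false := by
        simpa using htok
      have ht : ∀ r c : Int, pvInG matrix r c = true → [r, c] ≠ target := by
        intro r c hin heq
        rcases Bool.and_eq_false_iff.mp htok' with h1 | h1
        · have : target.length ≠ 2 := by simpa using h1
          exact this (by rw [← heq]; rfl)
        · rw [← heq, pvGet0, pvGet1] at h1
          rw [h1] at hin
          exact Bool.false_ne_true hin
      rw [htok', Bool.false_and]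
      exact pvLoop_ne_target matrix target ht _ [start] [start]
        (by intro v hv; rcases List.mem_cons.mp hv with rfl | hv
            · exact hst
            · simp at hv)

-- ===== VERDICT (by name: the statement is the Claim_ definition above) =====
theorem generic_dfs_spec : Claim_equal_generic_dfs := by
  unfold Claim_equal_generic_dfs
  intro matrix start target _ _
  unfold Spec_generic_dfs
  rw [pvA_eq_E, pvB_eq_E]
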